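-- pv_equiv track=rewrite | github.com/OuissaleHamhoum/AiiForsa | python/job_matcher/__init__.py | _get_highest_degree
-- ===== SOURCE A (Python) =====
-- from typing import Dict, Any, List, Tuple
--
-- def _get_highest_degree(education: List[Dict]) -> str:
--     """Get candidate's highest degree"""
--     degree_levels = {"phd": 4, "doctorate": 4, "master": 3, "msc": 3, "mba": 3,
--                     "bachelor": 2, "bsc": 2, "ba": 2, "associate": 1}
--
--     highest = 0
--     highest_degree = "None"
--
--     for edu in education:
--         degree = edu.get("degree", "").lower()
--         for key, level in degree_levels.items():
--             if key in degree and level > highest: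
--                 highest = level
--                 highest_degree = key.upper()
--
--     return highest_degree
-- ===== SOURCE B (Python) =====
-- def _get_highest_degree(education):
--     """Get candidate's highest degree (reduce-then-search decomposition)."""
--     degree_levels = {"phd": 4, "doctorate": 4, "master": 3, "msc": 3, "mba": 3,
--                     "bachelor": 2, "bsc": 2, "ba": 2, "associate": 1}
--
--     best = 0
--     for edu in education:
--         degree = edu.get("degree", "").lower()
--         for key, level in degree_levels.items():
--             if key in degree and level > best:
--                 best = level
--
--     if best == 0:
--         return "None"
--
--     for edu in education:
--         degree = edu.get("degree", "").lower()
--         for key, level in degree_levels.items():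
--             if key in degree and level == best:
--                 return key.upper()
--     return "None"
-- ===== Notes on version B (the rewrite author's own statement) =====
-- stated objective: alternative
-- what changed: Replaces A's single pass that accumulates (highest level, highest key) together with a reduce-then-search decomposition: a first pass computes only the maximum matched level, and if it is nonzero a second pass with early return finds the first key (same education-outer, dict-inner scan order) whose level equals that maximum.
import Mathlib
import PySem

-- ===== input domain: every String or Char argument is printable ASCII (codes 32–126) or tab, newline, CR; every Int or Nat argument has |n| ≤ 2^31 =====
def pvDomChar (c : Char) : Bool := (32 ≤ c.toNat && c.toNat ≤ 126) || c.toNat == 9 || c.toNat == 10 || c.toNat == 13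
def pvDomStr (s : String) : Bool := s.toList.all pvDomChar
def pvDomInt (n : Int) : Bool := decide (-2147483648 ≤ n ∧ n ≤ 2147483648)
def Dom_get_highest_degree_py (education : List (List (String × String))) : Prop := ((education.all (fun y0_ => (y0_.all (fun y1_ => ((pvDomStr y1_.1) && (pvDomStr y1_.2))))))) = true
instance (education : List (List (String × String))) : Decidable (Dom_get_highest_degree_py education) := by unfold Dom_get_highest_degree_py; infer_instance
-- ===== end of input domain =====

-- B replaces A's single accumulating pass with a reduce (max level) then search (first key at that
-- level) decomposition over the same scan order; objective: alternative (not claimed faster).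

-- the degree_levels dict of both programs, in insertion order
def degree_pairs : List (String × Int) :=
  [("phd", 4), ("doctorate", 4), ("master", 3), ("msc", 3), ("mba", 3),
   ("bachelor", 2), ("bsc", 2), ("ba", 2), ("associate", 1)]

-- edu.get("degree", "").lower()  (both programs perform exactly this step)
def pvDegree (edu : List (String × String)) : String :=
  PySem.Str.lower ((PySem.Dict.ofList edu).getD "degree" "")

-- ===== PORT A =====
def get_highest_degree_py (education : List (List (String × String))) : String :=
  let res := education.foldl
    (fun (st : Int × String) edu =>
      let degree := pvDegree edu
      degree_pairs.foldl
        (fun (st : Int × String) kl =>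
          if PySem.Str.isIn kl.1 degree && decide (kl.2 > st.1) then
            (kl.2, PySem.Str.upper kl.1)
          else st)
        st)
    (0, "None")
  res.2

-- ===== PORT B =====
-- second pass, inner loop: first key matching degree with level == best (early return)
def searchPairs : List (String × Int) → String → Int → Option String
  | [], _, _ => none
  | kl :: rest, degree, best =>
    if PySem.Str.isIn kl.1 degree && (kl.2 == best) then some (PySem.Str.upper kl.1)
    else searchPairs rest degree best

-- second pass, outer loop
def searchEdu : List (List (String × String)) → Int → Option String
  | [], _ => none
  | edu :: rest, best =>
    match searchPairs degree_pairs (pvDegree edu) best with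
    | some k => some k
    | none => searchEdu rest best

def get_highest_degree_py_alt (education : List (List (String × String))) : String :=
  let best := education.foldl
    (fun (b : Int) edu =>
      let degree := pvDegree edu
      degree_pairs.foldl
        (fun (b : Int) kl => if PySem.Str.isIn kl.1 degree && decide (kl.2 > b) then kl.2 else b)
        b)
    0
  if best == 0 then "None"
  else
    match searchEdu education best with
    | some k => k
    | none => "None"

-- ===== PRECONDITION & SPEC =====
def Spec_get_highest_degree_py (education : List (List (String × String))) (out : String) : Prop := out = get_highest_degree_py_alt education
instance (education : List (List (String × String))) (out : String) : Decidable (Spec_get_highest_degree_py education out) := by unfold Spec_get_highest_degree_py; infer_instance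

-- ===== CLAIM (what is proved, stated in full; the proofs are below) =====
def Claim_equal_get_highest_degree_py : Prop := ∀ (education : List (List (String × String))), Dom_get_highest_degree_py education → Spec_get_highest_degree_py education (get_highest_degree_py education)

-- ===== LEMMAS AND PROOFS =====

-- abstract element: (key matches degree, level, key)
def pvStepA (st : Int × String) (t : Bool × Int × String) : Int × String :=
  if t.1 && decide (t.2.1 > st.1) then (t.2.1, PySem.Str.upper t.2.2) else st

def pvStepB (b : Int) (t : Bool × Int × String) : Int :=
  if t.1 && decide (t.2.1 > b) then t.2.1 else b

def pvFm (m : Int) (t : Bool × Int × String) : Option String :=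
  if t.1 && (t.2.1 == m) then some (PySem.Str.upper t.2.2) else none

def pvGmap (edu : List (String × String)) : List (Bool × Int × String) :=
  degree_pairs.map (fun kl => (PySem.Str.isIn kl.1 (pvDegree edu), kl.2, kl.1))

def pvFlat (education : List (List (String × String))) : List (Bool × Int × String) :=
  education.flatMap pvGmap

theorem pvFoldl_flatMap {α β γ : Type} (g : α → List β) (f : γ → β → γ) :
    ∀ (l : List α) (init : γ),
      l.foldl (fun st x => (g x).foldl f st) init = (l.flatMap g).foldl f init := by
  intro l
  induction l with
  | nil => intro init; simp
  | cons x xs ih => intro init; simp [List.foldl_append, ih]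

theorem pvInnerA (st : Int × String) (edu : List (String × String)) :
    (let degree := pvDegree edu
     degree_pairs.foldl
        (fun (st : Int × String) kl =>
          if PySem.Str.isIn kl.1 degree && decide (kl.2 > st.1) then
            (kl.2, PySem.Str.upper kl.1)
          else st) st) = (pvGmap edu).foldl pvStepA st := by
  simp only [pvGmap, List.foldl_map, pvStepA]

theorem pvA_flat (education : List (List (String × String))) :
    get_highest_degree_py education = ((pvFlat education).foldl pvStepA (0, "None")).2 := by
  unfold get_highest_degree_py pvFlat
  rw [← pvFoldl_flatMap pvGmap pvStepA]
  refine congrArg Prod.snd ?_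
  exact List.foldl_ext _ _ _ (fun st edu _ => pvInnerA st edu)

theorem pvB_flat_best (education : List (List (String × String))) :
    education.foldl
      (fun (b : Int) edu =>
        let degree := pvDegree edu
        degree_pairs.foldl
          (fun (b : Int) kl => if PySem.Str.isIn kl.1 degree && decide (kl.2 > b) then kl.2 else b)
          b)
      0 = (pvFlat education).foldl pvStepB 0 := by
  unfold pvFlat
  rw [← pvFoldl_flatMap pvGmap pvStepB]
  exact List.foldl_ext _ _ _ (fun b edu _ => by
    simp only [pvGmap, List.foldl_map, pvStepB])

theorem pvSearchPairs_eq (degree : String) (m : Int) :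
    ∀ (ps : List (String × Int)),
      searchPairs ps degree m =
        (ps.map (fun kl => (PySem.Str.isIn kl.1 degree, kl.2, kl.1))).findSome? (pvFm m) := by
  intro ps
  induction ps with
  | nil => simp [searchPairs]
  | cons kl rest ih =>
    simp only [searchPairs, List.map_cons, List.findSome?_cons, pvFm, ih]
    split <;> simp_all

theorem pvSearchEdu_eq (m : Int) :
    ∀ (education : List (List (String × String))),
      searchEdu education m = (pvFlat education).findSome? (pvFm m) := by
  intro education
  induction education with
  | nil => simp [searchEdu, pvFlat]
  | cons edu rest ih =>
    simp only [searchEdu, pvFlat, List.flatMap_cons, List.findSome?_append, ih,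
      pvSearchPairs_eq, pvGmap]
    cases (degree_pairs.map (fun kl => (PySem.Str.isIn kl.1 (pvDegree edu), kl.2, kl.1))).findSome? (pvFm m) <;> simp

theorem pvLe_best : ∀ (l : List (Bool × Int × String)) (h : Int), h ≤ l.foldl pvStepB h := by
  intro l
  induction l with
  | nil => intro h; simp
  | cons t ts ih =>
    intro h
    simp only [List.foldl_cons, pvStepB]
    split
    · rename_i hc
      simp at hc
      exact le_trans (le_of_lt hc.2) (ih _)
    · exact ih h

theorem pvBest_exists :
    ∀ (l : List (Bool × Int × String)) (h : Int), h < l.foldl pvStepB h →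
      (l.findSome? (pvFm (l.foldl pvStepB h))).isSome := by
  intro l
  induction l with
  | nil => intro h hlt; simp at hlt
  | cons t ts ih =>
    intro h hlt
    simp only [List.foldl_cons, List.findSome?_cons] at *
    by_cases hc : (t.1 && decide (t.2.1 > h)) = true
    · rw [pvStepB, if_pos hc] at *
      simp at hc
      by_cases heq : t.2.1 = ts.foldl pvStepB t.2.1
      · have : pvFm (ts.foldl pvStepB t.2.1) t = some (PySem.Str.upper t.2.2) := by
          simp [pvFm, hc.1, ← heq]
        rw [this]; rfl
      · have hlt2 : t.2.1 < ts.foldl pvStepB t.2.1 :=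
          lt_of_le_of_ne (pvLe_best ts t.2.1) heq
        have := ih t.2.1 hlt2
        cases hf : pvFm (ts.foldl pvStepB t.2.1) t <;> simp [this]
    · rw [pvStepB, if_neg hc] at *
      have hhead : pvFm (ts.foldl pvStepB h) t = none := by
        simp only [pvFm]
        by_cases hb : t.1 = true
        · simp only [hb, Bool.true_and]
          simp only [hb, Bool.true_and] at hc
          have ht : ¬ t.2.1 > h := by simpa using hc
          have : t.2.1 ≠ ts.foldl pvStepB h := by
            intro he; rw [he] at ht; omega
          simp [this]
        · simp [Bool.not_eq_true] at hb
          simp [hb]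
      rw [hhead]
      exact ih h hlt

theorem pvMain :
    ∀ (l : List (Bool × Int × String)) (h : Int) (hd : String),
      l.foldl pvStepA (h, hd) =
        (l.foldl pvStepB h,
          if h < l.foldl pvStepB h then (l.findSome? (pvFm (l.foldl pvStepB h))).getD hd else hd) := by
  intro l
  induction l with
  | nil => intro h hd; simp
  | cons t ts ih =>
    intro h hd
    simp only [List.foldl_cons, List.findSome?_cons]
    by_cases hc : (t.1 && decide (t.2.1 > h)) = true
    · rw [pvStepA, if_pos hc, pvStepB, if_pos hc]
      simp only [ih]
      simp only [Bool.and_eq_true, decide_eq_true_eq] at hc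
      have hle : t.2.1 ≤ ts.foldl pvStepB t.2.1 := pvLe_best ts t.2.1
      have hm : h < ts.foldl pvStepB t.2.1 := lt_of_lt_of_le hc.2 hle
      rw [if_pos hm]
      by_cases heq : t.2.1 = ts.foldl pvStepB t.2.1
      · have hhead : pvFm (ts.foldl pvStepB t.2.1) t = some (PySem.Str.upper t.2.2) := by
          simp [pvFm, hc.1, ← heq]
        rw [if_neg (by omega), hhead]
        simp
      · have hlt2 : t.2.1 < ts.foldl pvStepB t.2.1 := lt_of_le_of_ne hle heq
        have hhead : pvFm (ts.foldl pvStepB t.2.1) t = none := by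
          simp [pvFm, heq]
        rw [if_pos hlt2, hhead]
        have hsome := pvBest_exists ts t.2.1 hlt2
        cases hf : ts.findSome? (pvFm (ts.foldl pvStepB t.2.1)) with
        | none => rw [hf] at hsome; simp at hsome
        | some k => simp
    · rw [pvStepA, if_neg hc, pvStepB, if_neg hc]
      simp only [ih]
      by_cases hm : h < ts.foldl pvStepB h
      · have hhead : pvFm (ts.foldl pvStepB h) t = none := by
          simp only [pvFm]
          by_cases hb : t.1 = true
          · simp only [hb, Bool.true_and] at hc ⊢
            have ht : ¬ t.2.1 > h := by simpa using hc
            have : t.2.1 ≠ ts.foldl pvStepB h := by intro he; rw [he] at ht; omega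
            simp [this]
          · simp [Bool.not_eq_true] at hb
            simp [hb]
        rw [if_pos hm, if_pos hm, hhead]
      · rw [if_neg hm, if_neg hm]

-- ===== VERDICT (by name: the statement is the Claim_ definition above) =====
theorem get_highest_degree_py_spec : Claim_equal_get_highest_degree_py := by
  intro education _
  unfold Spec_get_highest_degree_py
  rw [pvA_flat]
  unfold get_highest_degree_py_alt
  simp only [pvB_flat_best, pvSearchEdu_eq, pvMain]
  set m := (pvFlat education).foldl pvStepB 0 with hm
  have h0 : (0 : Int) ≤ m := pvLe_best _ 0
  by_cases hz : m = 0
  · simp [hz]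
  · have hpos : (0 : Int) < m := lt_of_le_of_ne h0 (Ne.symm hz)
    have hsome := pvBest_exists (pvFlat education) 0 hpos
    rw [← hm] at hsome
    simp only [if_pos hpos, beq_iff_eq, if_neg hz]
    cases hf : (pvFlat education).findSome? (pvFm m) with
    | none => rw [hf] at hsome; simp at hsome
    | some k => simp
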